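-- pv_equiv track=rewrite | github.com/Anaons/AdventOfCode | 2020/day6.py | parseTable_v2
-- ===== SOURCE A (Python) =====
-- def parseTable_v2(lines):
--     result = 0
--     currentSet = set()
--
--     newgroup = True
--     for line in lines:
--         if line == "":
--             result += len(currentSet)
--             newgroup = True
--         else:
--             if (newgroup):
--                 currentSet = set(list(line))
--             else:
--                 currentSet = currentSet.intersection(set(list(line)))
--             newgroup = False
--
--     return result
-- ===== SOURCE B (Python) =====
-- def parseTable_v2(lines):
--     result = 0
--     tally = {}
--     groupLines = 0
--     newgroup = True
--     for line in lines:
--         if line == "":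
--             result += sum(1 for v in tally.values() if v == groupLines)
--             newgroup = True
--         else:
--             if newgroup:
--                 tally = {}
--                 groupLines = 0
--                 newgroup = False
--             for c in set(line):
--                 tally[c] = tally.get(c, 0) + 1
--             groupLines += 1
--     return result
-- ===== Notes on version B (the rewrite author's own statement) =====
-- stated objective: alternative
-- what changed: Instead of maintaining a running set intersection per group, B maintains a dict tallying in how many of the group's lines each character occurs plus a line counter, and on a blank line counts the tally values equal to the line count.
import Mathlib
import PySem

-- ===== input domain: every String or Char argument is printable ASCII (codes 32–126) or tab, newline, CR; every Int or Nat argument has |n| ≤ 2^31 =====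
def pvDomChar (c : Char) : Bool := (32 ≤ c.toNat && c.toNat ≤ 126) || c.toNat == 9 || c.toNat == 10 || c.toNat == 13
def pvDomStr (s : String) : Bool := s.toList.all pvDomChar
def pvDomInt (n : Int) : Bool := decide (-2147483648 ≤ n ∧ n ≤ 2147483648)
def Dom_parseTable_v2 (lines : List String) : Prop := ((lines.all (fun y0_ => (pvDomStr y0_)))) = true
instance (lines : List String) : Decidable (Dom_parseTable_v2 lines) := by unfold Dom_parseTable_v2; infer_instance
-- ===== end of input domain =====

-- B replaces the running set-intersection by a per-group tally (dict of per-line-set occurrence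
-- counts) and a line counter: on a blank line it counts the characters seen in every line of the
-- current group (objective: alternative — different maintained state, same cost).

-- ===== PORT A =====
-- loop body of A: state = (result, currentSet, newgroup)
def pvStepA (st : Int × PySem.Set Char × Bool) (line : String) : Int × PySem.Set Char × Bool :=
  if line == "" then
    (st.1 + PySem.Set.len st.2.1, st.2.1, true)
  else
    (st.1,
     (if st.2.2 then PySem.Set.ofList line.toList
      else PySem.Set.inter st.2.1 (PySem.Set.ofList line.toList)),
     false)

def parseTable_v2 (lines : List String) : Int :=
  (lines.foldl pvStepA (0, PySem.Set.empty, true)).1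

-- ===== PORT B =====
-- loop body of B: state = (result, tally, groupLines, newgroup)
def pvStepB (st : Int × PySem.Dict Char Int × Int × Bool) (line : String) :
    Int × PySem.Dict Char Int × Int × Bool :=
  if line == "" then
    (st.1 + (List.countP (fun v => v == st.2.2.1) st.2.1.values : Int), st.2.1, st.2.2.1, true)
  else
    let t := if st.2.2.2 then PySem.Dict.empty else st.2.1
    let g : Int := if st.2.2.2 then 0 else st.2.2.1
    (st.1,
     (PySem.Set.ofList line.toList).foldl (fun d x => d.modify x 0 (fun v => v + 1)) t,
     g + 1, false)

def parseTable_v2_alt (lines : List String) : Int :=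
  (lines.foldl pvStepB (0, PySem.Dict.empty, 0, true)).1

-- ===== PRECONDITION & SPEC =====
def Spec_parseTable_v2 (lines : List String) (out : Int) : Prop := out = parseTable_v2_alt lines
instance (lines : List String) (out : Int) : Decidable (Spec_parseTable_v2 lines out) := by unfold Spec_parseTable_v2; infer_instance

-- ===== CLAIM (what is proved, stated in full; the proofs are below) =====
def Claim_equal_parseTable_v2 : Prop := ∀ (lines : List String), Dom_parseTable_v2 lines → Spec_parseTable_v2 lines (parseTable_v2 lines)

-- ===== LEMMAS AND PROOFS =====

-- The coupling invariant between A's state and B's state.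
def pvRel (resA : Int) (cs : PySem.Set Char) (ngA : Bool)
    (resB : Int) (t : PySem.Dict Char Int) (g : Int) (ngB : Bool) : Prop :=
  resA = resB ∧ ngA = ngB ∧ cs.Nodup ∧ t.keys.Nodup ∧
  (∀ c : Char, 0 ≤ t.getD c 0 ∧ t.getD c 0 ≤ g) ∧
  (∀ c ∈ t.keys, 1 ≤ t.getD c 0) ∧
  (∀ c : Char, c ∈ cs ↔ (t.getD c 0 = g ∧ 0 < g)) ∧
  (ngA = false → 1 ≤ g)

-- |currentSet| = number of tally values equal to groupLines.
lemma pvLen_eq (cs : PySem.Set Char) (t : PySem.Dict Char Int) (g : Int)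
    (h1 : cs.Nodup) (h2 : t.keys.Nodup)
    (h4 : ∀ c ∈ t.keys, 1 ≤ t.getD c 0)
    (h5 : ∀ c : Char, c ∈ cs ↔ (t.getD c 0 = g ∧ 0 < g)) :
    PySem.Set.len cs = (List.countP (fun v => v == g) t.values : Int) := by
  have hv : List.countP (fun v => v == g) t.values
      = (t.keys.filter (fun k => t.getD k 0 == g)).length := by
    rw [PySem.Dict.values_eq_map_keys t h2 0, List.countP_map, List.countP_eq_length_filter]
    rfl
  have hperm : cs.Perm (t.keys.filter (fun k => t.getD k 0 == g)) := by
    rw [List.perm_ext_iff_of_nodup h1 (h2.filter _)]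
    intro c
    rw [List.mem_filter, h5]
    constructor
    · rintro ⟨he, hg⟩
      refine ⟨?_, by simp [he]⟩
      by_contra hk
      have hc : t.contains c = false := by
        by_contra hcc
        exact hk ((PySem.Dict.contains_iff_mem_keys t c).1 (by
          cases hcon : t.contains c <;> simp_all))
      have := PySem.Dict.getD_of_not_contains t (k := c) 0 hc
      omega
    · rintro ⟨hk, he⟩
      have he' : t.getD c 0 = g := by simpa using he
      have := h4 c hk
      exact ⟨he', by omega⟩
  rw [hv, ← hperm.length_eq]
  simp [PySem.Set.len]

-- nodup count as 0/1
lemma pvCount01 {S : List Char} (hS : S.Nodup) (c : Char) :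
    ((S.count c : Nat) : Int) = if c ∈ S then 1 else 0 := by
  by_cases hm : c ∈ S
  · simp [hm, List.count_eq_one_of_mem hS hm]
  · simp [hm, List.count_eq_zero_of_not_mem hm]

-- one loop step preserves the invariant
lemma pvRel_step (line : String) (a : Int × PySem.Set Char × Bool)
    (b : Int × PySem.Dict Char Int × Int × Bool)
    (h : pvRel a.1 a.2.1 a.2.2 b.1 b.2.1 b.2.2.1 b.2.2.2) :
    pvRel (pvStepA a line).1 (pvStepA a line).2.1 (pvStepA a line).2.2
          (pvStepB b line).1 (pvStepB b line).2.1 (pvStepB b line).2.2.1 (pvStepB b line).2.2.2 := by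
  obtain ⟨hres, hng, h1, h2, h3, h4, h5, h6⟩ := h
  by_cases hb : line = ""
  · subst hb
    simp only [pvStepA, pvStepB, beq_self_eq_true, if_true, pvRel]
    refine ⟨?_, trivial, h1, h2, h3, h4, h5, by simp⟩
    rw [hres, pvLen_eq a.2.1 b.2.1 b.2.2.1 h1 h2 h4 h5]
  · have hbne : (line == "") = false := by simp [hb]
    obtain ⟨S, hSdef⟩ : ∃ S : PySem.Set Char, PySem.Set.ofList line.toList = S := ⟨_, rfl⟩
    have hSnd : S.Nodup := hSdef ▸ PySem.Set.nodup_ofList _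
    cases hng' : b.2.2.2
    · -- newgroup = false
      have hA : a.2.2 = false := by rw [hng, hng']
      have hg1 : 1 ≤ b.2.2.1 := h6 hA
      have hsA : pvStepA a line = (a.1, PySem.Set.inter a.2.1 S, false) := by
        simp [pvStepA, hbne, hA, hSdef]
      have hsB : pvStepB b line
          = (b.1, S.foldl (fun d x => d.modify x 0 (fun v => v + 1)) b.2.1,
             b.2.2.1 + 1, false) := by
        simp [pvStepB, hbne, hng', hSdef]
      have hget : ∀ c : Char,
          (S.foldl (fun d x => d.modify x 0 (fun v => v + 1)) b.2.1).getD c 0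
          = b.2.1.getD c 0 + if c ∈ S then 1 else 0 := by
        intro c
        exact (PySem.Dict.getD_foldl_modify_add_one S b.2.1 c).trans
          (by rw [pvCount01 hSnd c])
      have hkeys : (S.foldl (fun d x => d.modify x 0 (fun v => v + 1)) b.2.1).keys
          = PySem.Set.update b.2.1.keys S :=
        PySem.Dict.keys_foldl_modify S 0 (fun _ _ v => v + 1) b.2.1
      rw [hsA, hsB]
      dsimp only
      refine ⟨hres, rfl, PySem.Set.nodup_inter _ _ h1, ?_, ?_, ?_, ?_, fun _ => by omega⟩
      · rw [hkeys]; exact PySem.Set.nodup_update _ _ h2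
      · intro c
        rw [hget c]
        have h3c := h3 c
        split <;> omega
      · intro c hc
        rw [hkeys] at hc
        rw [hget c]
        rcases (PySem.Set.mem_update _ _ _).1 hc with hk | hs
        · have h4c := h4 c hk
          split <;> omega
        · have h3c := h3 c
          simp [hs]
          omega
      · intro c
        rw [PySem.Set.mem_inter, hget c]
        rw [h5 c]
        have h3c := h3 c
        by_cases hs : c ∈ S <;> simp [hs] <;> omega
    · -- newgroup = true
      have hA : a.2.2 = true := by rw [hng, hng']
      have hsA : pvStepA a line = (a.1, S, false) := by
        simp [pvStepA, hbne, hA, hSdef]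
      have hsB : pvStepB b line
          = (b.1, S.foldl (fun d x => d.modify x 0 (fun v => v + 1)) (PySem.Dict.empty : PySem.Dict Char Int),
             (0 : Int) + 1, false) := by
        simp [pvStepB, hbne, hng', hSdef]
      have hget : ∀ c : Char,
          (S.foldl (fun d x => d.modify x 0 (fun v => v + 1)) (PySem.Dict.empty : PySem.Dict Char Int)).getD c 0
          = if c ∈ S then 1 else 0 := by
        intro c
        exact (PySem.Dict.getD_foldl_modify_add_one S (PySem.Dict.empty : PySem.Dict Char Int) c).trans
          (by rw [pvCount01 hSnd c]; simp [PySem.Dict.getD_empty])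
      have hkeys : (S.foldl (fun d x => d.modify x 0 (fun v => v + 1)) (PySem.Dict.empty : PySem.Dict Char Int)).keys
          = S := by
        refine (PySem.Dict.keys_foldl_modify S 0 (fun _ _ v => v + 1) (PySem.Dict.empty : PySem.Dict Char Int)).trans ?_
        rw [PySem.Dict.keys_empty, PySem.Set.update_nil_left]
        exact PySem.Set.ofList_eq_self_of_nodup S hSnd
      rw [hsA, hsB]
      dsimp only
      refine ⟨hres, rfl, hSnd, ?_, ?_, ?_, ?_, fun _ => by omega⟩
      · rw [hkeys]; exact hSnd
      · intro c; rw [hget c]; split <;> omega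
      · intro c hc
        rw [hkeys] at hc
        rw [hget c]; simp [hc]
      · intro c
        rw [hget c]
        by_cases hs : c ∈ S <;> simp [hs]

-- the two folds stay related
lemma pvLoop (lines : List String) (a : Int × PySem.Set Char × Bool)
    (b : Int × PySem.Dict Char Int × Int × Bool)
    (h : pvRel a.1 a.2.1 a.2.2 b.1 b.2.1 b.2.2.1 b.2.2.2) :
    (lines.foldl pvStepA a).1 = (lines.foldl pvStepB b).1 := by
  induction lines generalizing a b with
  | nil => exact h.1
  | cons l ls ih => exact ih _ _ (pvRel_step l a b h)

-- ===== VERDICT (by name: the statement is the Claim_ definition above) =====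
theorem parseTable_v2_spec : Claim_equal_parseTable_v2 := by
  intro lines _
  unfold Spec_parseTable_v2 parseTable_v2 parseTable_v2_alt
  apply pvLoop
  refine ⟨rfl, rfl, List.nodup_nil, by simp [PySem.Dict.keys_empty], ?_, ?_, ?_, by simp⟩
  · intro c; simp [PySem.Dict.getD_empty]
  · intro c hc; simp [PySem.Dict.keys_empty] at hc
  · intro c; simp [PySem.Dict.getD_empty]
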